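-- pv_equiv track=rewrite | github.com/ishanporwal/MIC-engineering-prevalence | project_files/helpers.py | clean_words_list
-- ===== SOURCE A (Python) =====
-- def clean_words_list(words_list):
--     """
--     Filters out the punctation and citation from a list of words so that
--     the words themselves can directly be accessed without interferences.
--
--     Args:
--         words_list: A list of words containign the words extracted from
--         the content of a Wikipedia page
--
--     Returns:
--         A list of strings containing the words extracted from the paragraphs
--         but this time without punctuation and citations.
--     """
--     # filters out punctuation and citations in the text of paragraphs
--     cleaned_words_list = []
--     filter_out = [".", ",", ":", "!", "?", ";", '"', "-", "(", ")"]
--     skip_next = False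
--
--     for word in words_list:
--         cleaned_characters = []
--         skip_next = False  # Reset skip_next for each word
--         i = 0  # Track the current position within the word
--         while i < len(word):
--             character = word[i]
--             if skip_next:
--                 skip_next = False
--                 i += 1
--                 continue
--             if character in filter_out:
--                 i += 1
--                 continue
--             if character == "[":
--                 # Skip over the citation
--                 while i + 1 < len(word) and word[i + 1] != "]":
--                     i += 1
--                 skip_next = True  # Skip the closing bracket ']'
--                 i += 1
--                 continue
--             cleaned_characters.append(character)
--             i += 1
--         cleaned_word = "".join(cleaned_characters)
--         if cleaned_word:
--             cleaned_words_list.append(cleaned_word)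
--     return cleaned_words_list
-- ===== SOURCE B (Python) =====
-- def clean_words_list(words_list):
--     drop = set('.,:!?;"-()')
--     result = []
--     for word in words_list:
--         # pass 1: remove [citation] segments (unclosed '[' drops the rest)
--         parts = []
--         rest = word
--         while True:
--             j = rest.find('[')
--             if j < 0:
--                 parts.append(rest)
--                 break
--             parts.append(rest[:j])
--             k = rest.find(']', j + 1)
--             if k < 0:
--                 break
--             rest = rest[k + 1:]
--         # pass 2: filter punctuation
--         cleaned = ''.join(c for c in ''.join(parts) if c not in drop)
--         if cleaned:
--             result.append(cleaned)
--     return result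
-- ===== Notes on version B (the rewrite author's own statement) =====
-- stated objective: alternative
-- what changed: Replaces A's single-pass index/skip_next state machine with a two-pass decomposition: citations are removed first by a find/slice loop over the word, then punctuation is dropped by a separate character filter.
import Mathlib
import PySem

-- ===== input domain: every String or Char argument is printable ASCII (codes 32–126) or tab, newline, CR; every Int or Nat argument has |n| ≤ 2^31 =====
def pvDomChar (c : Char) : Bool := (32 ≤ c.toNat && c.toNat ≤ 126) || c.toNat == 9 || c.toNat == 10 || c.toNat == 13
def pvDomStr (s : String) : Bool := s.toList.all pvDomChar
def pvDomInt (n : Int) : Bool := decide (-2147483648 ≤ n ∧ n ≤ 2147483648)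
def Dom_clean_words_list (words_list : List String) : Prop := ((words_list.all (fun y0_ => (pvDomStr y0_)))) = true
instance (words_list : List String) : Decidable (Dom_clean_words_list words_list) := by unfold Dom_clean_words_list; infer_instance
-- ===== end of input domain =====

-- B replaces A's one-pass index/skip_next state machine by a two-pass decomposition
-- (find/slice citation removal, then a punctuation filter); objective: alternative.


-- ===== PORT A =====
def pvFilterOut : List Char := ['.', ',', ':', '!', '?', ';', '"', '-', '(', ')']

mutual
-- the outer while loop with skip_next = False; the '[' branch enters pvSkipA
def pvLoopA : List Char → List Char
  | [] => []
  | c :: rest =>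
    if pvFilterOut.contains c then pvLoopA rest
    else if c = '[' then pvSkipA rest
    else c :: pvLoopA rest
-- the inner while "skip over the citation" plus the skip_next consumption of ']'
def pvSkipA : List Char → List Char
  | [] => []
  | c :: rest => if c = ']' then pvLoopA rest else pvSkipA rest
end

def clean_words_list (words_list : List String) : List String :=
  words_list.foldl (fun acc w =>
    let cleaned_word := String.mk (pvLoopA w.toList)
    if cleaned_word ≠ "" then acc ++ [cleaned_word] else acc) []

-- ===== PORT B =====
def pvDropSet : PySem.Set Char := PySem.Set.ofList ".,:!?;\"-()".toList

-- Source B's while-True loop over `rest`; rest.find(c) for a one-char needle is ported as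
-- List.findIdx?, and the slices rest[:j] / rest[k+1:] as take/drop (exact for these bounds)
def pvBLoop (parts rest : List Char) : List Char :=
  match h : rest.findIdx? (· = '[') with
  | none => parts ++ rest
  | some j =>
    match (rest.drop (j + 1)).findIdx? (· = ']') with
    | none => parts ++ rest.take j
    | some k => pvBLoop (parts ++ rest.take j) ((rest.drop (j + 1)).drop (k + 1))
termination_by rest.length
decreasing_by
  cases rest with
  | nil => simp at h
  | cons a t => simp

def clean_words_list_alt (words_list : List String) : List String :=
  words_list.foldl (fun acc w =>
    let cleaned := String.mk ((pvBLoop [] w.toList).filter (fun c => !(PySem.Set.contains pvDropSet c)))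
    if cleaned ≠ "" then acc ++ [cleaned] else acc) []

-- ===== PRECONDITION & SPEC =====
def Spec_clean_words_list (words_list : List String) (out : List String) : Prop := out = clean_words_list_alt words_list
instance (words_list : List String) (out : List String) : Decidable (Spec_clean_words_list words_list out) := by unfold Spec_clean_words_list; infer_instance

-- ===== CLAIM (what is proved, stated in full; the proofs are below) =====
def Claim_equal_clean_words_list : Prop := ∀ (words_list : List String), Dom_clean_words_list words_list → Spec_clean_words_list words_list (clean_words_list words_list)

-- ===== LEMMAS AND PROOFS =====

-- reference citation stripper (proof-only): what both passes compute before/after filtering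
mutual
def pvStrip : List Char → List Char
  | [] => []
  | c :: t => if c = '[' then pvSkip t else c :: pvStrip t
def pvSkip : List Char → List Char
  | [] => []
  | c :: t => if c = ']' then pvStrip t else pvSkip t
end

theorem pvStrip_of_no_lb : ∀ (s : List Char), (∀ c ∈ s, c ≠ '[') → pvStrip s = s := by
  intro s
  induction s with
  | nil => intro _; rfl
  | cons c t ih =>
    intro h
    have hc : c ≠ '[' := h c (by simp)
    simp [pvStrip, hc, ih (fun x hx => h x (by simp [hx]))]

theorem pvStrip_append_lb : ∀ (p t : List Char), (∀ c ∈ p, c ≠ '[') →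
    pvStrip (p ++ '[' :: t) = p ++ pvSkip t := by
  intro p
  induction p with
  | nil => intro t _; simp [pvStrip]
  | cons c q ih =>
    intro t h
    have hc : c ≠ '[' := h c (by simp)
    simp [pvStrip, hc, ih t (fun x hx => h x (by simp [hx]))]

theorem pvSkip_of_no_rb : ∀ (s : List Char), (∀ c ∈ s, c ≠ ']') → pvSkip s = [] := by
  intro s
  induction s with
  | nil => intro _; rfl
  | cons c t ih =>
    intro h
    have hc : c ≠ ']' := h c (by simp)
    simp [pvSkip, hc, ih (fun x hx => h x (by simp [hx]))]

theorem pvSkip_append_rb : ∀ (p t : List Char), (∀ c ∈ p, c ≠ ']') →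
    pvSkip (p ++ ']' :: t) = pvStrip t := by
  intro p
  induction p with
  | nil => intro t _; simp [pvSkip]
  | cons c q ih =>
    intro t h
    have hc : c ≠ ']' := h c (by simp)
    simp [pvSkip, hc, ih t (fun x hx => h x (by simp [hx]))]

-- findIdx? characterization: prefix fails, hit succeeds
theorem pvFindIdx?_split {α : Type} (p : α → Bool) :
    ∀ (s : List α) (j : Nat), s.findIdx? p = some j →
      (∀ c ∈ s.take j, p c = false) ∧ ∃ h : j < s.length, p (s[j]'h) = true := by
  intro s
  induction s with
  | nil => intro j h; simp at h
  | cons a t ih =>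
    intro j h
    rw [List.findIdx?_cons] at h
    by_cases hpa : p a = true
    · simp [hpa] at h
      subst h
      exact ⟨by simp, by simp [hpa]⟩
    · simp [hpa] at h
      obtain ⟨j', hj', rfl⟩ := h
      obtain ⟨h1, h2, h3⟩ := ih j' hj'
      refine ⟨?_, by simpa using h2, by simpa using h3⟩
      intro c hc
      simp [List.take_succ_cons] at hc
      rcases hc with rfl | hc
      · simpa using hpa
      · exact h1 c hc

theorem pvBLoop_eq_strip_aux : ∀ (n : Nat) (rest parts : List Char), rest.length ≤ n →
    pvBLoop parts rest = parts ++ pvStrip rest := by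
  intro n
  induction n with
  | zero =>
    intro rest parts hn
    have : rest = [] := by cases rest <;> simp_all
    subst this
    simp [pvBLoop, pvStrip]
  | succ n ih =>
    intro rest parts hn
    rw [pvBLoop]
    split
    · rename_i h
      have hno := List.findIdx?_eq_none_iff.mp h
      rw [pvStrip_of_no_lb rest (fun c hc => by simpa using hno c hc)]
    · rename_i j h
      obtain ⟨hpre, hj, hhit⟩ := pvFindIdx?_split _ rest j h
      have hsplit : rest = rest.take j ++ '[' :: rest.drop (j + 1) := by
        conv_lhs => rw [← List.take_append_drop j rest]
        congr 1
        rw [List.drop_eq_getElem_cons hj]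
        simp_all
      have hstrip : pvStrip rest = rest.take j ++ pvSkip (rest.drop (j + 1)) := by
        conv_lhs => rw [hsplit]
        exact pvStrip_append_lb _ _ (fun c hc => by simpa using hpre c hc)
      split
      · rename_i h2
        have hno := List.findIdx?_eq_none_iff.mp h2
        rw [hstrip, pvSkip_of_no_rb _ (fun c hc => by simpa using hno c hc)]
        simp
      · rename_i k h2
        set d := rest.drop (j + 1) with hd
        obtain ⟨hpre2, hk, hhit2⟩ := pvFindIdx?_split _ d k h2
        have hsplit2 : d = d.take k ++ ']' :: d.drop (k + 1) := by
          conv_lhs => rw [← List.take_append_drop k d]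
          congr 1
          rw [List.drop_eq_getElem_cons hk]
          have hc : d[k] = ']' := by simpa using hhit2
          rw [hc]
        have hskip : pvSkip d = pvStrip (d.drop (k + 1)) := by
          conv_lhs => rw [hsplit2]
          exact pvSkip_append_rb _ _ (fun c hc => by simpa using hpre2 c hc)
        have hlen : (d.drop (k + 1)).length ≤ n := by
          simp [hd] at *
          omega
        rw [ih _ _ hlen, hstrip, hskip]
        simp

theorem pvBLoop_eq_strip (rest parts : List Char) : pvBLoop parts rest = parts ++ pvStrip rest :=
  pvBLoop_eq_strip_aux rest.length rest parts le_rfl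

theorem pvLoopA_eq_filter_strip : ∀ (s : List Char),
    pvLoopA s = (pvStrip s).filter (fun c => !(pvFilterOut.contains c)) ∧
    pvSkipA s = (pvSkip s).filter (fun c => !(pvFilterOut.contains c)) := by
  intro s
  induction s with
  | nil => simp [pvLoopA, pvSkipA, pvStrip, pvSkip]
  | cons c t ih =>
    obtain ⟨ih1, ih2⟩ := ih
    constructor
    · by_cases hf : pvFilterOut.contains c = true
      · have hlb : c ≠ '[' := by
          intro hc; subst hc; simp [pvFilterOut] at hf
        have hf' : c ∈ pvFilterOut := by simpa using hf
        simp [pvLoopA, pvStrip, hf', hlb, ih1]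
      · by_cases hlb : c = '['
        · subst hlb
          have hnf : '[' ∉ pvFilterOut := by decide
          simp [pvLoopA, pvStrip, hnf, ih2]
        · have hf' : c ∉ pvFilterOut := by simpa using hf
          simp [pvLoopA, pvStrip, hf', hlb, ih1]
    · by_cases hrb : c = ']'
      · subst hrb
        simp [pvSkipA, pvSkip, ih1]
      · simp [pvSkipA, pvSkip, hrb, ih2]

-- ===== VERDICT (by name: the statement is the Claim_ definition above) =====
theorem pvKeep_eq (c : Char) : (!(PySem.Set.contains pvDropSet c)) = (!(pvFilterOut.contains c)) := by
  have : pvDropSet = pvFilterOut := by decide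
  rw [this, PySem.Set.contains]

theorem clean_words_list_spec : Claim_equal_clean_words_list := by
  intro ws _
  unfold Spec_clean_words_list clean_words_list clean_words_list_alt
  congr 1
  funext acc w
  rw [pvBLoop_eq_strip]
  simp only [List.nil_append]
  rw [(funext pvKeep_eq : _), ← (pvLoopA_eq_filter_strip w.toList).1]
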